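-- pv_equiv track=rewrite | github.com/mattkistner/CS-1301 | HW09.py | pirateTreasure
-- ===== SOURCE A (Python) =====
-- def pirateTreasure(directionList):
--     if directionList == []:
--         return 0
--     else:
--         if directionList[0] == 'up':
--             return 1 + pirateTreasure(directionList[1:])
--         elif directionList[0] == 'down':
--             return -1 + pirateTreasure(directionList[1:])
--         else:
--             pass
--     pass
-- ===== SOURCE B (Python) =====
-- def pirateTreasure(directionList):
--     total = 0
--     for d in directionList:
--         if d == 'up':
--             total += 1
--         elif d == 'down':
--             total -= 1
--         else:
--             return None
--     return total
-- ===== Notes on version B (the rewrite author's own statement) =====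
-- stated objective: simpler
-- what changed: Replaced the slicing recursion with a single iterative accumulator loop that returns None on the first invalid token; Pre_ excludes only lists with an invalid token at index >= 1, on which A raises TypeError (None + int).
import Mathlib
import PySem

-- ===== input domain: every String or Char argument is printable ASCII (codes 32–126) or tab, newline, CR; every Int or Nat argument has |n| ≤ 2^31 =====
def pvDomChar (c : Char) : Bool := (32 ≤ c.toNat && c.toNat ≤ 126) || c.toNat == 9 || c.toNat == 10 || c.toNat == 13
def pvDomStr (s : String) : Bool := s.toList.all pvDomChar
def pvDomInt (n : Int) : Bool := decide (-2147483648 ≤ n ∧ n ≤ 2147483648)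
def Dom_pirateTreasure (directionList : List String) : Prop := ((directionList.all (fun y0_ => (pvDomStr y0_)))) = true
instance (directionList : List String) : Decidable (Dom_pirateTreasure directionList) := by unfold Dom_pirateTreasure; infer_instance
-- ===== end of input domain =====

-- B: iterative accumulator loop instead of A's slicing recursion (simpler); on tails
-- containing an invalid token A raises TypeError while B returns None (see Raises_).

-- ===== PORT A =====
-- recursion on directionList[1:]; an invalid head returns None (the Python falls through to `pass`);
-- `1 + None` (a TypeError in Python) has no value here — such inputs are excluded by Pre_.
def pirateTreasure (directionList : List String) : Option Int :=
  match directionList with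
  | [] => some 0
  | d :: rest =>
    if d = "up" then (pirateTreasure rest).map (fun r => 1 + r)
    else if d = "down" then (pirateTreasure rest).map (fun r => -1 + r)
    else none

-- ===== PORT B =====
def pirateTreasureLoop (total : Int) (directionList : List String) : Option Int :=
  match directionList with
  | [] => some total
  | d :: rest =>
    if d = "up" then pirateTreasureLoop (total + 1) rest
    else if d = "down" then pirateTreasureLoop (total - 1) rest
    else none

def pirateTreasure_alt (directionList : List String) : Option Int :=
  pirateTreasureLoop 0 directionList

-- ===== PRECONDITION & SPEC =====
-- Pre_ excludes exactly the inputs where a valid prefix is followed by an invalid token,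
-- on which A raises TypeError (1 + None): A returns iff all tokens are 'up'/'down' or the head is invalid.
def Pre_pirateTreasure (directionList : List String) : Prop :=
  (∀ s ∈ directionList, s = "up" ∨ s = "down") ∨
  (∃ h ∈ directionList.take 1, ¬(h = "up" ∨ h = "down"))
instance (directionList : List String) : Decidable (Pre_pirateTreasure directionList) := by
  unfold Pre_pirateTreasure; infer_instance
def pvWitness_pirateTreasure : List String := ["left", "up", "down"]

def Spec_pirateTreasure (directionList : List String) (out : Option Int) : Prop := out = pirateTreasure_alt directionList
instance (directionList : List String) (out : Option Int) : Decidable (Spec_pirateTreasure directionList out) := by unfold Spec_pirateTreasure; infer_instance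

-- ===== CLAIM (what is proved, stated in full; the proofs are below) =====
def Claim_equal_pirateTreasure : Prop := ∀ (directionList : List String), Dom_pirateTreasure directionList → Pre_pirateTreasure directionList → Spec_pirateTreasure directionList (pirateTreasure directionList)

-- ===== LEMMAS AND PROOFS =====
-- On an all-valid list, B's loop computes A's result shifted by the accumulator.
theorem pirateTreasureLoop_eq_map (l : List String)
    (h : ∀ s ∈ l, s = "up" ∨ s = "down") (total : Int) :
    pirateTreasureLoop total l = (pirateTreasure l).map (fun r => total + r) := by
  induction l generalizing total with
  | nil => simp [pirateTreasureLoop, pirateTreasure]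
  | cons d rest ih =>
    have hd := h d (List.mem_cons_self)
    have hrest : ∀ s ∈ rest, s = "up" ∨ s = "down" := fun s hs => h s (List.mem_cons_of_mem _ hs)
    have e2 : (fun r => total - 1 + r) = (fun r : Int => total + -1 + r) := by funext r; omega
    rcases hd with hd | hd
    · simp [pirateTreasureLoop, pirateTreasure, hd, ih hrest, Option.map_map]
    · simp [pirateTreasureLoop, pirateTreasure, hd, ih hrest, Option.map_map, e2]

-- ===== VERDICT (by name: the statement is the Claim_ definition above) =====
theorem pirateTreasure_spec : Claim_equal_pirateTreasure := by
  intro l _ hpre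
  unfold Spec_pirateTreasure pirateTreasure_alt
  match l with
  | [] => simp [pirateTreasure, pirateTreasureLoop]
  | d :: rest =>
    rcases hpre with hall | ⟨h, hh, hbad⟩
    · have hrest : ∀ s ∈ rest, s = "up" ∨ s = "down" := fun s hs => hall s (List.mem_cons_of_mem _ hs)
      rcases hall d List.mem_cons_self with hd | hd
      · simp [pirateTreasure, pirateTreasureLoop, hd,
          pirateTreasureLoop_eq_map rest hrest 1]
      · simp [pirateTreasure, pirateTreasureLoop, hd,
          pirateTreasureLoop_eq_map rest hrest (-1)]
    · have hd : h = d := by simpa using hh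
      subst hd
      push Not at hbad
      simp [pirateTreasure, pirateTreasureLoop, hbad.1, hbad.2]
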